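-- pv_equiv track=rewrite | github.com/kaelmurphy/Soundex | Assign2.py | sameLetter
-- ===== SOURCE A (Python) =====
-- def sameLetter(x):
--     """this is the function that will determine whether two adjacent numbers are the same, it will replace one of the
--     numbers with 0 """
--     numberList = x
--     newNumberList = []
--     # for loop that will run through all the numbers for every string in the list
--     for i in range(len(numberList)):
--         newNumber = numberList[i]
--         if len(numberList[i]) > 1:
--             for k in range(0, len(numberList[i]) - 1):
--                 # this if statement compares whether the two numbers are the same, and replaces one of them with 0
--                 if numberList[i][k] == numberList[i][k + 1]:
--                     newNumber = newNumber[:k] + '0' + newNumber[k + 1:]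
--         newNumberList.append(newNumber)
--     return newNumberList
-- ===== SOURCE B (Python) =====
-- from itertools import groupby
--
-- def sameLetter(x):
--     return [''.join('0' * (sum(1 for _ in g) - 1) + c for c, g in groupby(s))
--             for s in x]
-- ===== Notes on version B (the rewrite author's own statement) =====
-- stated objective: idiomatic
-- what changed: Replaces the index-by-index adjacent comparison with string slicing rebuilds by an itertools.groupby run-grouping pass that emits '0'*(run-1)+char per maximal run and joins the pieces.
import Mathlib
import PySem

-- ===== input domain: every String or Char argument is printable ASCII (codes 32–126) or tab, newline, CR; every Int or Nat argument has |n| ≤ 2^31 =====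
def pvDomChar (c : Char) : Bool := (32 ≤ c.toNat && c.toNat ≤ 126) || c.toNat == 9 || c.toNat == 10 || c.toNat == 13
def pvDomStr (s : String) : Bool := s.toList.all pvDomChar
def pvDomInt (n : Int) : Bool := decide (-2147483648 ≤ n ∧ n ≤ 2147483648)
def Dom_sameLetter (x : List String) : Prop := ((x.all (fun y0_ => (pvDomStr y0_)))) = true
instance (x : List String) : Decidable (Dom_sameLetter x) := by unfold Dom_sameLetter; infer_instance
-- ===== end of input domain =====

-- B replaces A's index-by-index adjacent comparison (rebuilding the string by slicing)
-- with an itertools.groupby-style run-grouping pass: idiomatic, not claimed faster.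

-- ===== PORT A =====
-- inner loop body: if s[k] == s[k+1]: newNumber = newNumber[:k] + '0' + newNumber[k+1:]
def sameLetterStepA (cs : List Char) (nn : String) (k : Int) : String :=
  if PySem.List.pyGetD cs k ' ' == PySem.List.pyGetD cs (k + 1) ' ' then
    String.ofList (PySem.List.slice nn.toList none (some k) ++ ['0'] ++
                   PySem.List.slice nn.toList (some (k + 1)) none)
  else nn

def sameLetter (x : List String) : List String :=
  x.foldl (fun newNumberList s =>
    let newNumber :=
      if PySem.Str.len s > 1 then
        (PySem.List.pyRange 0 (PySem.Str.len s - 1) 1).foldl (sameLetterStepA s.toList) s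
      else s
    newNumberList ++ [newNumber]) []

-- ===== PORT B =====
-- groupby run-grouping: each maximal run of c with length L contributes '0'*(L-1) ++ [c]
def sameLetterRuns : List Char → List Char
  | [] => []
  | c :: rest =>
      List.replicate (rest.takeWhile (· == c)).length '0' ++
        c :: sameLetterRuns (rest.dropWhile (· == c))
termination_by cs => cs.length
decreasing_by
  simp only [List.length_cons]
  exact Nat.lt_succ_of_le (List.length_dropWhile_le _ _)

def sameLetter_alt (x : List String) : List String :=
  x.map (fun s => String.ofList (sameLetterRuns s.toList))

-- ===== PRECONDITION & SPEC =====
def Spec_sameLetter (x : List String) (out : List String) : Prop := out = sameLetter_alt x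
instance (x : List String) (out : List String) : Decidable (Spec_sameLetter x out) := by
  unfold Spec_sameLetter; infer_instance

-- ===== CLAIM (what is proved, stated in full; the proofs are below) =====
def Claim_equal_sameLetter : Prop := ∀ (x : List String), Dom_sameLetter x → Spec_sameLetter x (sameLetter x)

-- ===== LEMMAS AND PROOFS =====

-- pairwise specification both sides are reduced to
def sameLetterMark : List Char → List Char
  | [] => []
  | [a] => [a]
  | a :: b :: t => (if a == b then '0' else a) :: sameLetterMark (b :: t)

theorem mark_length (cs : List Char) : (sameLetterMark cs).length = cs.length := by
  fun_induction sameLetterMark cs <;> simp [*]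

theorem mark_getElem (cs : List Char) (i : Nat) (h : i < cs.length) :
    (sameLetterMark cs)[i]'(by rw [mark_length]; exact h) =
      if cs[i + 1]? = some (cs[i]'h) then '0' else cs[i]'h := by
  induction cs using sameLetterMark.induct generalizing i with
  | case1 => simp at h
  | case2 a =>
      have h0 : i = 0 := by simp at h; omega
      subst h0; simp [sameLetterMark]
  | case3 a b t ih =>
      cases i with
      | zero =>
          simp only [sameLetterMark, List.getElem_cons_zero, List.getElem?_cons_succ,
            List.getElem?_cons_zero, Option.some.injEq, beq_iff_eq]
          by_cases hab : a = b
          · simp [hab]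
          · rw [if_neg hab, if_neg (fun hba => hab hba.symm)]
      | succ i =>
          have hi : i < (b :: t).length := by simpa using h
          simpa [sameLetterMark] using ih i hi

-- B's runs compute the pairwise marking
theorem runs_eq_mark (cs : List Char) : sameLetterRuns cs = sameLetterMark cs := by
  induction cs using sameLetterMark.induct with
  | case1 => simp [sameLetterRuns, sameLetterMark]
  | case2 a => simp [sameLetterRuns, sameLetterMark]
  | case3 a b t ih =>
      by_cases hab : a = b
      · subst hab
        rw [sameLetterRuns, sameLetterMark, ← ih, sameLetterRuns]
        simp [List.takeWhile, List.dropWhile, List.replicate_succ]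
      · have hba : (b == a) = false := beq_eq_false_iff_ne.mpr (Ne.symm hab)
        have hab' : (a == b) = false := beq_eq_false_iff_ne.mpr hab
        rw [sameLetterRuns, sameLetterMark, ← ih]
        simp [List.takeWhile, List.dropWhile, hba, hab']

-- A's partially-processed string: positions < j that match their right neighbour are '0'
def sameLetterMarkN (j : Nat) (cs : List Char) : List Char :=
  cs.zipIdx.map (fun p => if p.2 < j ∧ cs[p.2 + 1]? = some p.1 then '0' else p.1)

theorem markN_length (j : Nat) (cs : List Char) : (sameLetterMarkN j cs).length = cs.length := by
  simp [sameLetterMarkN]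

theorem markN_getElem (j : Nat) (cs : List Char) (i : Nat) (h : i < cs.length) :
    (sameLetterMarkN j cs)[i]'(by rw [markN_length]; exact h) =
      if i < j ∧ cs[i + 1]? = some (cs[i]'h) then '0' else cs[i]'h := by
  simp [sameLetterMarkN]

theorem markN_zero (cs : List Char) : sameLetterMarkN 0 cs = cs := by
  apply List.ext_getElem (markN_length 0 cs)
  intro i h1 h2
  rw [markN_getElem 0 cs i h2]
  simp

-- one step of A's inner loop advances markN
theorem stepA_markN (cs : List Char) (j : Nat) (hj : j + 1 < cs.length) :
    sameLetterStepA cs (String.ofList (sameLetterMarkN j cs)) (j : Int) =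
      String.ofList (sameLetterMarkN (j + 1) cs) := by
  have hjlt : j < cs.length := by omega
  have hlen : j < (sameLetterMarkN j cs).length := by rw [markN_length]; exact hjlt
  unfold sameLetterStepA
  have h1 : PySem.List.pyGetD cs (j : Int) ' ' = cs[j]'hjlt := by
    rw [PySem.List.pyGetD_natCast]; exact List.getD_eq_getElem _ _ hjlt
  have h2 : PySem.List.pyGetD cs ((j : Int) + 1) ' ' = cs[j + 1]'hj := by
    have : ((j : Int) + 1) = ((j + 1 : Nat) : Int) := by push_cast; ring
    rw [this, PySem.List.pyGetD_natCast]; exact List.getD_eq_getElem _ _ hj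
  rw [h1, h2]
  by_cases heq : cs[j]'hjlt = cs[j + 1]'hj
  · rw [if_pos (by simpa using heq)]
    congr 1
    have hto : (String.ofList (sameLetterMarkN j cs)).toList = sameLetterMarkN j cs := by simp
    rw [hto]
    have hcast : ((j : Int) + 1) = ((j + 1 : Nat) : Int) := by push_cast; ring
    rw [PySem.List.slice_to_natCast, hcast, PySem.List.slice_from_natCast]
    have hset : (sameLetterMarkN j cs).take j ++ '0' :: (sameLetterMarkN j cs).drop (j + 1) =
        (sameLetterMarkN j cs).set j '0' := by
      rw [List.set_eq_take_append_cons_drop, if_pos hlen]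
    calc (sameLetterMarkN j cs).take j ++ ['0'] ++ (sameLetterMarkN j cs).drop (j + 1)
        = (sameLetterMarkN j cs).set j '0' := by rw [← hset]; simp
      _ = sameLetterMarkN (j + 1) cs := by
          apply List.ext_getElem (by rw [List.length_set, markN_length, markN_length])
          intro i h1' h2'
          have hi : i < cs.length := by rw [markN_length] at h2'; exact h2'
          rw [List.getElem_set, markN_getElem j cs i hi, markN_getElem (j + 1) cs i hi]
          by_cases hij : j = i
          · subst hij
            have : cs[j + 1]? = some (cs[j]'hjlt) := by
              rw [List.getElem?_eq_getElem hj]; exact congrArg some heq.symm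
            simp [this]
          · have : (i < j ∧ cs[i + 1]? = some (cs[i]'hi)) ↔
                (i < j + 1 ∧ cs[i + 1]? = some (cs[i]'hi)) := by
              constructor
              · rintro ⟨h, hc⟩; exact ⟨by omega, hc⟩
              · rintro ⟨h, hc⟩; exact ⟨by omega, hc⟩
            simp [hij, this]
  · rw [if_neg (by simpa using heq)]
    congr 1
    apply List.ext_getElem (by rw [markN_length, markN_length])
    intro i h1' h2'
    have hi : i < cs.length := by rw [markN_length] at h2'; exact h2'
    rw [markN_getElem j cs i hi, markN_getElem (j + 1) cs i hi]
    by_cases hij : i = j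
    · subst hij
      have : cs[i + 1]? ≠ some (cs[i]'hi) := by
        rw [List.getElem?_eq_getElem hj]
        simp only [ne_eq, Option.some.injEq]
        exact fun hba => heq hba.symm
      simp [this]
    · have : (i < j ∧ cs[i + 1]? = some (cs[i]'hi)) ↔
          (i < j + 1 ∧ cs[i + 1]? = some (cs[i]'hi)) := by
        constructor
        · rintro ⟨h, hc⟩; exact ⟨by omega, hc⟩
        · rintro ⟨h, hc⟩; exact ⟨by omega, hc⟩
      simp [this]

-- A's whole inner loop computes markN (n-1)
theorem foldA_markN (s : String) (j : Nat) (hj : j + 1 ≤ s.toList.length) :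
    (PySem.List.pyRange 0 (j : Int) 1).foldl (sameLetterStepA s.toList) s =
      String.ofList (sameLetterMarkN j s.toList) := by
  induction j with
  | zero =>
      rw [PySem.List.pyRange_one_eq_nil (by omega)]
      simp [markN_zero]
  | succ j ih =>
      have h1 : ((j : Int) + 1) = ((j + 1 : Nat) : Int) := by push_cast; ring
      rw [← h1, PySem.List.pyRange_one_succ_right (by omega), List.foldl_append,
        ih (by omega)]
      simpa using stepA_markN s.toList j (by omega)

theorem markN_eq_mark (cs : List Char) : sameLetterMarkN (cs.length - 1) cs = sameLetterMark cs := by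
  apply List.ext_getElem (by rw [markN_length, mark_length])
  intro i h1 h2
  have hi : i < cs.length := by rw [markN_length] at h1; exact h1
  rw [markN_getElem _ cs i hi, mark_getElem cs i hi]
  by_cases hc : cs[i + 1]? = some (cs[i]'hi)
  · have hlt : i + 1 < cs.length := (List.getElem?_eq_some_iff.mp hc).1
    simp [hc, show i < cs.length - 1 by omega]
  · simp [hc]

-- per-string agreement
theorem perString_eq (s : String) :
    (if PySem.Str.len s > 1 then
        (PySem.List.pyRange 0 (PySem.Str.len s - 1) 1).foldl (sameLetterStepA s.toList) s
      else s) = String.ofList (sameLetterRuns s.toList) := by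
  rw [runs_eq_mark]
  by_cases h : PySem.Str.len s > 1
  · rw [if_pos h]
    have hlen : 1 < s.toList.length := by
      have := h; rw [PySem.Str.len_eq] at this; exact_mod_cast this
    have h1 : PySem.Str.len s - 1 = ((s.toList.length - 1 : Nat) : Int) := by
      rw [PySem.Str.len_eq]; omega
    rw [h1, foldA_markN s (s.toList.length - 1) (by omega), markN_eq_mark]
  · rw [if_neg h]
    have hlen : s.toList.length ≤ 1 := by
      have := h; rw [PySem.Str.len_eq] at this; omega
    have hmk : sameLetterMark s.toList = s.toList := by
      cases hcs : s.toList with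
      | nil => simp [sameLetterMark]
      | cons a t =>
          cases t with
          | nil => simp [sameLetterMark]
          | cons b t' => rw [hcs] at hlen; simp at hlen
    rw [hmk, String.ofList_toList]

-- ===== VERDICT (by name: the statement is the Claim_ definition above) =====
theorem sameLetter_spec : Claim_equal_sameLetter := by
  intro x _
  unfold Spec_sameLetter sameLetter sameLetter_alt
  rw [PySem.List.foldl_append_singleton_eq_map]
  simp only [List.nil_append]
  exact List.map_congr_left (fun s _ => perString_eq s)
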